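-- pv_equiv track=rewrite | github.com/jeff-donovan/aoc-2024 | day_21/part2.py | _get_winner_index
-- ===== SOURCE A (Python) =====
-- def calculate_min_path_length(paths):
--     return min([len(path) for path in paths])
--
-- def _get_winner_index(seq_lengths):
--     max_level = max([max(seq_tree.keys()) for seq_tree in seq_lengths if len(seq_tree.keys()) > 0])
--     shortest_path_length = None
--     sequences_with_shortest_path = []
--     for i, sequence_tree in enumerate(seq_lengths):
--         if max_level not in sequence_tree:
--             continue
--
--         min_length = calculate_min_path_length(sequence_tree[max_level])
--         if shortest_path_length is None:
--             shortest_path_length = min_length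
--
--         if min_length == shortest_path_length:
--             sequences_with_shortest_path.append(i)
--
--         if min_length < shortest_path_length:
--             shortest_path_length = min_length
--             sequences_with_shortest_path = [i]
--
--     if len(sequences_with_shortest_path) == 1:
--         return sequences_with_shortest_path[0]
-- ===== SOURCE B (Python) =====
-- def _get_winner_index(seq_lengths):
--     max_level = max(level for tree in seq_lengths for level in tree.keys())
--     entries = sorted(((i, min(len(p) for p in tree[max_level]))
--                       for i, tree in enumerate(seq_lengths) if max_level in tree),
--                      key=lambda e: e[1])
--     if len(entries) == 1 or entries[0][1] < entries[1][1]: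
--         return entries[0][0]
-- ===== Notes on version B (the rewrite author's own statement) =====
-- stated objective: simpler
-- what changed: Replaced A's one-pass running-minimum accumulator (with its reset/append branches) by a staged decomposition: flatten all levels for the max, collect (index, min_length) pairs, stably sort them by min_length, and return the head index iff the sorted head's length is strictly below the second entry's (i.e. the minimum is unique).
import Mathlib
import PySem

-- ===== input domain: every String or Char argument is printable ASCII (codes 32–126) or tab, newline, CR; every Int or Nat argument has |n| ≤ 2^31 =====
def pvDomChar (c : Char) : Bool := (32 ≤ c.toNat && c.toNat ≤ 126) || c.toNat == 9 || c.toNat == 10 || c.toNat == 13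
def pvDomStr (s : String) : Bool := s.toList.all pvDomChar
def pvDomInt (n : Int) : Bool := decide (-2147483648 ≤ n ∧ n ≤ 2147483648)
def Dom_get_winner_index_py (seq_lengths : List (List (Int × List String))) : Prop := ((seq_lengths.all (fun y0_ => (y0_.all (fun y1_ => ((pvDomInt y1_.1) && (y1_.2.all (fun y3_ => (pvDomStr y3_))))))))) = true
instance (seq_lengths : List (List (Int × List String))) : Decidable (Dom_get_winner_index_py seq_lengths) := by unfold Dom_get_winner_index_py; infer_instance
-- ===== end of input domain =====

-- B replaces A's one-pass running-minimum accumulator (reset/append branches) by staged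
-- passes — flatten all levels for the max, collect (index, min_length) pairs, stable-sort
-- them by min_length, compare the first two entries — for simplicity; returns proved equal.

-- ===== PORT A =====
-- min([len(path) for path in paths])  (none = ValueError on an empty list)
def pvPathsMin (paths : List String) : Option Int :=
  PySem.List.min? (paths.map (fun p => (PySem.Str.len p : Int))) (fun y => y)

-- A's for-loop: running shortest_path_length (none = not yet set) and the tying index list;
-- result none = the ValueError raised inside calculate_min_path_length.
def pvALoop (M : Int) (sp : Option Int) (acc : List Int) :
    List (Int × List (Int × List String)) → Option (List Int)
  | [] => some acc
  | (i, t) :: rest =>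
    match (PySem.Dict.mk t).get? M with
    | none => pvALoop M sp acc rest
    | some paths =>
      match pvPathsMin paths with
      | none => none
      | some ml =>
        let sp0 := sp.getD ml
        let acc1 := if ml = sp0 then acc ++ [i] else acc
        if ml < sp0 then pvALoop M (some ml) [i] rest
        else pvALoop M (some sp0) acc1 rest

def get_winner_index_py (seq_lengths : List (List (Int × List String))) : Option Int :=
  match PySem.List.max?
      ((seq_lengths.filter (fun t => decide (0 < (PySem.Dict.mk t).keys.length))).map
        (fun t => ((PySem.List.max? (PySem.Dict.mk t).keys (fun y => y)).getD 0)))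
      (fun y => y) with
  | none => none  -- Python: ValueError (excluded by Pre_)
  | some M =>
    match pvALoop M none [] (PySem.List.enumerate seq_lengths) with
    | none => none  -- Python: ValueError in calculate_min_path_length (excluded by Pre_)
    | some acc => if acc.length = 1 then PySem.List.pyGet? acc 0 else none

-- ===== PORT B =====
-- the generator feeding sorted(): (i, min(len(p) for p in tree[max_level])) for every tree
-- containing max_level; none = the ValueError raised by min() on an empty path list.
def pvEntries (M : Int) :
    List (Int × List (Int × List String)) → Option (List (Int × Int))
  | [] => some []
  | (i, t) :: rest =>
    match (PySem.Dict.mk t).get? M with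
    | none => pvEntries M rest
    | some paths =>
      match PySem.List.min? (paths.map (fun p => (PySem.Str.len p : Int))) (fun y => y) with
      | none => none
      | some ml => (pvEntries M rest).map (fun es => (i, ml) :: es)

def get_winner_index_py_alt (seq_lengths : List (List (Int × List String))) : Option Int :=
  match PySem.List.max?
      (seq_lengths.flatMap (fun t => (PySem.Dict.mk t).keys)) (fun y => y) with
  | none => none  -- Python: ValueError (excluded by Pre_)
  | some M =>
    match pvEntries M (PySem.List.enumerate seq_lengths) with
    | none => none  -- Python: ValueError (excluded by Pre_)
    | some es =>
      match PySem.List.sorted es (fun e => e.2) with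
      | [] => none  -- Python: IndexError on entries[0] (unreachable: M is a key of some tree)
      | (i0, m0) :: rest =>
        match rest with
        | [] => some i0
        | (_, m1) :: _ => if m0 < m1 then some i0 else none

-- ===== PRECONDITION & SPEC =====
-- Pre_ excludes exactly the inputs on which Python A raises ValueError: every tree empty
-- (so the outer max() gets an empty iterable), or some tree maps the maximal level to an
-- empty path list (so calculate_min_path_length calls min() on an empty list).
def Pre_get_winner_index_py (seq_lengths : List (List (Int × List String))) : Prop :=
  seq_lengths.flatMap (fun t => (PySem.Dict.mk t).keys) ≠ [] ∧
  ∀ t ∈ seq_lengths,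
    (PySem.Dict.mk t).get?
      ((PySem.List.max? (seq_lengths.flatMap (fun t => (PySem.Dict.mk t).keys)) (fun y => y)).getD 0)
      ≠ some []
instance (seq_lengths : List (List (Int × List String))) : Decidable (Pre_get_winner_index_py seq_lengths) := by unfold Pre_get_winner_index_py; infer_instance

def pvWitness_get_winner_index_py : (List (List (Int × List String))) := [[((0 : Int), ["a"])]]

def Spec_get_winner_index_py (seq_lengths : List (List (Int × List String))) (out : Option Int) : Prop := out = get_winner_index_py_alt seq_lengths
instance (seq_lengths : List (List (Int × List String))) (out : Option Int) : Decidable (Spec_get_winner_index_py seq_lengths out) := by unfold Spec_get_winner_index_py; infer_instance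

-- ===== CLAIM (what is proved, stated in full; the proofs are below) =====
def Claim_equal_get_winner_index_py : Prop := ∀ (seq_lengths : List (List (Int × List String))), Dom_get_winner_index_py seq_lengths → Pre_get_winner_index_py seq_lengths → Spec_get_winner_index_py seq_lengths (get_winner_index_py seq_lengths)

-- ===== LEMMAS AND PROOFS =====

-- combining the maxima of two chunks of a list
def pvOMax : Option Int → Option Int → Option Int
  | none, b => b
  | some x, none => some x
  | some x, some y => some (max x y)

theorem pvMax_append (a b : List Int) :
    PySem.List.max? (a ++ b) (fun y => y) =
      pvOMax (PySem.List.max? a (fun y => y)) (PySem.List.max? b (fun y => y)) := by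
  cases a with
  | nil => cases b <;> rfl
  | cons x a' =>
    rw [List.cons_append, PySem.List.max?_id_cons, List.foldl_append]
    cases b with
    | nil => rw [PySem.List.max?_id_cons]; rfl
    | cons y b' =>
      rw [PySem.List.max?_id_cons, PySem.List.max?_id_cons]
      simp only [List.foldl_cons, pvOMax]
      rw [List.foldl_assoc]

-- A's max of per-tree maxima over nonempty key lists equals B's max of the flattened keys
theorem pvMax_flatten (xss : List (List Int)) :
    PySem.List.max? ((xss.filter (fun ks => decide (0 < ks.length))).map
        (fun ks => (PySem.List.max? ks (fun y => y)).getD 0)) (fun y => y)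
      = PySem.List.max? xss.flatten (fun y => y) := by
  induction xss with
  | nil => rfl
  | cons ks rest ih =>
    cases ks with
    | nil => simpa [List.filter_cons] using ih
    | cons k kt =>
      rw [List.flatten_cons, pvMax_append, ← ih]
      simp only [List.filter_cons, List.length_cons, decide_eq_true_eq]
      rw [if_pos (by omega), List.map_cons, ← List.singleton_append, pvMax_append]
      rw [PySem.List.max?_id_cons (x := k) (t := kt)]
      simp [PySem.List.max?_id_cons]

-- the state transformer performed by one iteration of A's loop on a collected pair
def pvStep : (Option Int × List Int) → (Int × Int) → (Option Int × List Int)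
  | (sp, acc), (i, ml) =>
    let sp0 := sp.getD ml
    if ml < sp0 then (some ml, [i])
    else (some sp0, if ml = sp0 then acc ++ [i] else acc)

theorem pvALoop_eq_entries (M : Int) :
    ∀ (l : List (Int × List (Int × List String))) (sp : Option Int) (acc : List Int),
    pvALoop M sp acc l = (pvEntries M l).map (fun es => (es.foldl pvStep (sp, acc)).2) := by
  intro l
  induction l with
  | nil => intro sp acc; rfl
  | cons p rest ih =>
    intro sp acc
    obtain ⟨i, t⟩ := p
    cases hg : (PySem.Dict.mk t).get? M with
    | none => simp only [pvALoop, pvEntries, hg]; exact ih sp acc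
    | some paths =>
      cases hm : pvPathsMin paths with
      | none =>
        have hm' : PySem.List.min? (paths.map (fun p => (PySem.Str.len p : Int))) (fun y => y) = none := hm
        simp only [pvALoop, pvEntries, hg, hm, hm']
        rfl
      | some ml =>
        have hm' : PySem.List.min? (paths.map (fun p => (PySem.Str.len p : Int))) (fun y => y) = some ml := hm
        simp only [pvALoop, pvEntries, hg, hm, hm']
        by_cases h : ml < sp.getD ml
        · rw [if_pos h, ih (some ml) [i]]
          cases pvEntries M rest <;> simp [pvStep, h]
        · rw [if_neg h, ih (some (sp.getD ml)) _]
          cases pvEntries M rest <;> simp [pvStep, h]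

theorem pvRun_some (pairs : List (Int × Int)) :
    ∀ (v : Int) (acc : List Int),
    (pairs.foldl pvStep (some v, acc)).2 =
      (if (pairs.map (·.2)).foldl min v = v then acc else []) ++
        (pairs.filter (fun p => p.2 == (pairs.map (·.2)).foldl min v)).map (·.1) := by
  induction pairs with
  | nil => intro v acc; simp
  | cons p rest ih =>
    intro v acc
    obtain ⟨i, ml⟩ := p
    have hble : (rest.map (·.2)).foldl min ml ≤ ml := (PySem.List.foldl_min_le _ _).1
    have hble' : (rest.map (·.2)).foldl min v ≤ v := (PySem.List.foldl_min_le _ _).1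
    simp only [List.foldl_cons, List.map_cons, List.filter_cons, pvStep, Option.getD_some]
    rcases lt_trichotomy ml v with hlt | heq | hgt
    · rw [if_pos hlt, ih ml [i]]
      have hmm : min v ml = ml := min_eq_right (le_of_lt hlt)
      simp only [hmm]
      have hb : ¬ (rest.map (·.2)).foldl min ml = v := by omega
      rw [if_neg hb]
      by_cases h2 : (rest.map (·.2)).foldl min ml = ml
      · simp [h2]
      · have : (ml == (rest.map (·.2)).foldl min ml) = false := by
          simp; omega
        simp [h2, this]
    · subst heq
      rw [if_neg (lt_irrefl ml), if_pos rfl, ih ml (acc ++ [i])]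
      simp only [min_self]
      by_cases h2 : (rest.map (·.2)).foldl min ml = ml
      · simp [h2]
      · have : (ml == (rest.map (·.2)).foldl min ml) = false := by
          simp; omega
        simp [h2, this]
    · have h1 : ¬ ml < v := by omega
      have h2 : ¬ ml = v := by omega
      rw [if_neg h1, if_neg h2, ih v acc]
      have hmm : min v ml = v := min_eq_left (le_of_lt hgt)
      simp only [hmm]
      have : (ml == (rest.map (·.2)).foldl min v) = false := by
        simp; omega
      simp [this]

-- A's "exactly one tie at the minimum b" test equals B's look at the first two sorted entries
theorem pvSortFinal (es : List (Int × Int)) (b : Int)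
    (hmem : ∃ p ∈ es, p.2 = b) (hlb : ∀ p ∈ es, b ≤ p.2) :
    (if ((es.filter (fun p => p.2 == b)).map (·.1)).length = 1
       then PySem.List.pyGet? ((es.filter (fun p => p.2 == b)).map (·.1)) 0 else none)
    = (match PySem.List.sorted es (fun e => e.2) with
      | [] => none
      | (i0, m0) :: rest => match rest with
        | [] => some i0
        | (_, m1) :: _ => if m0 < m1 then some i0 else none) := by
  cases hE : PySem.List.sorted es (fun e => e.2) with
  | nil =>
    have hnil : es = [] := (PySem.List.sorted_eq_nil_iff _ _ _).mp hE
    subst hnil; simp at hmem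
  | cons hd rest =>
    obtain ⟨i0, m0⟩ := hd
    have hperm : ((i0, m0) :: rest).Perm es := hE ▸ PySem.List.sorted_perm es (fun e => e.2) false
    have hhead : ∀ y ∈ es, m0 ≤ y.2 := by
      intro y hy
      exact PySem.List.key_head_sorted_le _ _ hE y hy
    have hm0 : m0 = b := by
      obtain ⟨p, hp, hpb⟩ := hmem
      have h1 := hhead p hp
      have h2 := hlb (i0, m0) (hperm.mem_iff.mp (List.mem_cons_self))
      omega
    subst hm0
    have hfil : (es.filter (fun p => p.2 == m0)).Perm (((i0, m0) :: rest).filter (fun p => p.2 == m0)) :=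
      (hperm.filter _).symm
    cases rest with
    | nil =>
      have hes : es = [(i0, m0)] := List.perm_singleton.mp hperm.symm
      subst hes
      simp [PySem.List.pyGet?, PySem.List.pyIdx?]
    | cons hd1 r =>
      obtain ⟨i1, m1⟩ := hd1
      have hpw : ((i0, m0) :: (i1, m1) :: r).Pairwise (fun a b => a.2 ≤ b.2) := by
        have := PySem.List.sorted_pairwise es (fun e => e.2)
        rwa [hE] at this
      rw [List.pairwise_cons] at hpw
      obtain ⟨h0all, hpw1⟩ := hpw
      rw [List.pairwise_cons] at hpw1
      obtain ⟨h1all, _⟩ := hpw1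
      by_cases hlt : m0 < m1
      · have hrestne : ∀ q ∈ (i1, m1) :: r, ¬ (q.2 == m0) = true := by
          intro q hq
          rcases List.mem_cons.mp hq with h | h
          · subst h; simp; omega
          · have := h1all q h; simp; omega
        have hfe : (((i0, m0) :: (i1, m1) :: r).filter (fun p => p.2 == m0)) = [(i0, m0)] := by
          rw [List.filter_cons]
          simp only [beq_self_eq_true, if_pos]
          rw [List.filter_eq_nil_iff.mpr hrestne]
        rw [hfe] at hfil
        have : es.filter (fun p => p.2 == m0) = [(i0, m0)] := List.perm_singleton.mp hfil
        rw [this]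
        show _ = if m0 < m1 then some i0 else none
        simp [hlt, PySem.List.pyGet?, PySem.List.pyIdx?]
      · have hm1 : m1 = m0 := le_antisymm (by omega) (h0all (i1, m1) List.mem_cons_self)
        have hlen : (es.filter (fun p => p.2 == m0)).length =
            (((i0, m0) :: (i1, m1) :: r).filter (fun p => p.2 == m0)).length := hfil.length_eq
        rw [List.filter_cons, List.filter_cons] at hlen
        simp only [hm1, beq_self_eq_true, if_pos] at hlen
        show _ = if m0 < m1 then some i0 else none
        rw [if_neg hlt, if_neg (by rw [List.length_map, hlen]; simp)]

theorem pv_main (seq_lengths : List (List (Int × List String))) :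
    get_winner_index_py seq_lengths = get_winner_index_py_alt seq_lengths := by
  unfold get_winner_index_py get_winner_index_py_alt
  have hmax : PySem.List.max?
      ((seq_lengths.filter (fun t => decide (0 < (PySem.Dict.mk t).keys.length))).map
        (fun t => ((PySem.List.max? (PySem.Dict.mk t).keys (fun y => y)).getD 0)))
      (fun y => y)
      = PySem.List.max? (seq_lengths.flatMap (fun t => (PySem.Dict.mk t).keys)) (fun y => y) := by
    have h := pvMax_flatten (seq_lengths.map (fun t => (PySem.Dict.mk t).keys))
    rw [List.filter_map, List.map_map] at h
    rw [List.flatMap_def]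
    exact h
  rw [hmax]
  cases PySem.List.max? (seq_lengths.flatMap fun t => (PySem.Dict.mk t).keys) (fun y => y) with
  | none => rfl
  | some M =>
    simp only []
    rw [pvALoop_eq_entries M (PySem.List.enumerate seq_lengths) none []]
    cases pvEntries M (PySem.List.enumerate seq_lengths) with
    | none => rfl
    | some es =>
      simp only [Option.map_some]
      cases es with
      | nil => rfl
      | cons p rest =>
        obtain ⟨i, ml⟩ := p
        have hstep : pvStep (none, ([] : List Int)) (i, ml) = (some ml, [i]) := by
          simp [pvStep]
        rw [List.foldl_cons, hstep, pvRun_some rest ml [i]]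
        set b := (rest.map (·.2)).foldl min ml with hb
        have hacc : (if b = ml then [i] else []) ++ (rest.filter (fun p => p.2 == b)).map (·.1)
            = ((((i, ml) :: rest).filter (fun p => p.2 == b)).map (·.1)) := by
          rcases eq_or_ne ml b with h | h
          · simp [← h]
          · have hbeq : (ml == b) = false := by simp [h]
            simp [hbeq, if_neg (Ne.symm h)]
        simp only [hacc]
        have hmem : ∃ p ∈ (i, ml) :: rest, p.2 = b := by
          rcases PySem.List.foldl_min_mem (rest.map (·.2)) ml with h | h
          · exact ⟨(i, ml), List.mem_cons_self, h.symm⟩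
          · obtain ⟨q, hq, hq2⟩ := List.mem_map.mp h
            exact ⟨q, List.mem_cons_of_mem _ hq, hq2⟩
        have hlb : ∀ p ∈ (i, ml) :: rest, b ≤ p.2 := by
          intro p hp
          rcases List.mem_cons.mp hp with h | h
          · subst h; exact (PySem.List.foldl_min_le _ _).1
          · exact (PySem.List.foldl_min_le _ _).2 p.2 (List.mem_map_of_mem h)
        exact pvSortFinal ((i, ml) :: rest) b hmem hlb

-- ===== VERDICT (by name: the statement is the Claim_ definition above) =====
theorem get_winner_index_py_spec : Claim_equal_get_winner_index_py := by
  intro sl _ _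
  unfold Spec_get_winner_index_py
  exact pv_main sl
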